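-- pv_equiv track=rewrite | github.com/taiwanfifi/CFA_essay | experiments/I3_noise_red_herrings/noise_injector.py | _find_injection_point
-- ===== SOURCE A (Python) =====
-- def _find_injection_point(query: str) -> int:
--     """Find a natural injection point in the middle of the question."""
--     # Try to inject before the last sentence (before "The PV..." or similar)
--     sentences = query.split(".")
--     if len(sentences) >= 3:
--         # Insert before the last substantive sentence
--         rejoin = ".".join(sentences[:-2]) + "."
--         return len(rejoin)
--
--     # Fallback: insert at roughly the middle
--     mid = len(query) // 2
--     # Find the nearest period or comma
--     for offset in range(20):
--         for pos in [mid + offset, mid - offset]: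
--             if 0 <= pos < len(query) and query[pos] in ".,:;":
--                 return pos + 1
--     return mid
-- ===== SOURCE B (Python) =====
-- def _find_injection_point(query: str) -> int:
--     """Find a natural injection point in the middle of the question."""
--     # At least two periods: the injection point is right after the
--     # second-to-last period (located directly, no split/rejoin needed).
--     last = query.rfind(".")
--     if last != -1:
--         prev = query.rfind(".", 0, last)
--         if prev != -1:
--             return prev + 1
--
--     # Fallback: the delimiter nearest the middle (ties prefer the right side),
--     # found by one scan over the string instead of an offset search.
--     mid = len(query) // 2
--     near = [i for i, ch in enumerate(query) if ch in ".,:;" and abs(i - mid) < 20]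
--     if near:
--         return min(near, key=lambda i: (abs(i - mid), mid - i)) + 1
--     return mid
-- ===== Notes on version B (the rewrite author's own statement) =====
-- stated objective: simpler
-- what changed: The two-periods branch locates the second-to-last period directly with rfind instead of splitting into sentences, slicing and rejoining; the fallback picks the delimiter nearest the middle (ties to the right) by one comprehension + min-with-key instead of the nested offset-search loop.
import Mathlib
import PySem

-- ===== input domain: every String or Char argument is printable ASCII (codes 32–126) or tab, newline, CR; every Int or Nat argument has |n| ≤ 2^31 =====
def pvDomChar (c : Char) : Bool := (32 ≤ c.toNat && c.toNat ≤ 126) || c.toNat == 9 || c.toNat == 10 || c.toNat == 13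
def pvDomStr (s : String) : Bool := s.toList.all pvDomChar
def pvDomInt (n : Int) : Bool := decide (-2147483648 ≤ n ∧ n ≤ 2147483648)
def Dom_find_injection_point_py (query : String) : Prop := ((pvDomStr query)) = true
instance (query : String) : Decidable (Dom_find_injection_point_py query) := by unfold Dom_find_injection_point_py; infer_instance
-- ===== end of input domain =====

-- B locates the second-to-last period directly with rfind instead of split/slice/rejoin, and
-- finds the fallback delimiter by one scan + min-by-distance instead of the offset search (simpler).

-- ===== PORT A =====

-- 0 <= pos < len(query) and query[pos] in ".,:;"   (the index is in range under the guard)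
def pvHit (query : String) (pos : Int) : Bool :=
  decide (0 ≤ pos) && decide (pos < PySem.Str.len query) &&
    (match PySem.Str.pyGet? query pos with
     | some c => PySem.Chars.isIn [c] ".,:;".toList
     | none => false)

-- the nested  'for offset in range(20): for pos in [mid + offset, mid - offset]: …'  search
def pvLoopA (query : String) (mid : Int) : List Int → Int
  | [] => mid
  | o :: rest =>
    if pvHit query (mid + o) then mid + o + 1
    else if pvHit query (mid - o) then mid - o + 1
    else pvLoopA query mid rest

def find_injection_point_py (query : String) : Int :=
  let sentences := (PySem.Str.split? query ".").getD []   -- sep "." ≠ "", so split? is always `some`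
  if 3 ≤ sentences.length then
    PySem.Str.len (PySem.Str.join "." (PySem.List.slice sentences none (some (-2))) ++ ".")
  else
    pvLoopA query (PySem.Int.floordiv (PySem.Str.len query) 2) (PySem.List.pyRange 0 20)

-- ===== PORT B =====

-- [i for i, ch in enumerate(query) if ch in ".,:;" and abs(i - mid) < 20]
def pvNear (query : String) (mid : Int) : List Int :=
  ((PySem.List.enumerate query.toList 0).filter
      (fun p => PySem.Chars.isIn [p.2] ".,:;".toList && decide (|p.1 - mid| < 20))).map (·.1)

-- mid = len(query) // 2 ; if near: return min(near, key=…) + 1 ; return mid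
def pvFallbackB (query : String) : Int :=
  let mid := PySem.Int.floordiv (PySem.Str.len query) 2
  match PySem.List.min2? (pvNear query mid) (fun i => |i - mid|) (fun i => mid - i) with
  | some m => m + 1
  | none => mid

def find_injection_point_py_alt (query : String) : Int :=
  let last := PySem.Str.rfind query "."
  if last ≠ -1 then
    let prev := PySem.Str.rfindFrom query "." 0 (some last)
    if prev ≠ -1 then prev + 1 else pvFallbackB query
  else pvFallbackB query

-- ===== PRECONDITION & SPEC =====
def Spec_find_injection_point_py (query : String) (out : Int) : Prop := out = find_injection_point_py_alt query
instance (query : String) (out : Int) : Decidable (Spec_find_injection_point_py query out) := by unfold Spec_find_injection_point_py; infer_instance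

-- ===== CLAIM (what is proved, stated in full; the proofs are below) =====
def Claim_equal_find_injection_point_py : Prop := ∀ (query : String), Dom_find_injection_point_py query → Spec_find_injection_point_py query (find_injection_point_py query)

-- ===== LEMMAS AND PROOFS =====

-- clean structural form of query.split(".")
def splitDot : List Char → List (List Char)
  | [] => [[]]
  | c :: rest =>
    if c = '.' then [] :: splitDot rest
    else match splitDot rest with
      | [] => [[c]]
      | p :: ps => (c :: p) :: ps

theorem splitDot_ne_nil (cs : List Char) : splitDot cs ≠ [] := by
  cases cs with
  | nil => simp [splitDot]
  | cons c rest =>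
    simp only [splitDot]
    split
    · simp
    · split <;> simp

theorem length_splitDot (cs : List Char) : (splitDot cs).length = cs.count '.' + 1 := by
  induction cs with
  | nil => simp [splitDot]
  | cons c rest ih =>
    simp only [splitDot, List.count_cons]
    by_cases hc : c = '.'
    · simp [hc, ih]
    · cases h : splitDot rest with
      | nil => exact absurd h (splitDot_ne_nil rest)
      | cons p ps =>
        rw [h] at ih
        simp [hc, ← ih]

theorem splitOn_go_eq (fuel : Nat) : ∀ (l cur : List Char) (acc : List (List Char)),
    l.length < fuel →
    PySem.Chars.splitOn.go ['.'] fuel l cur acc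
      = acc.reverse ++ (match splitDot l with
          | [] => []
          | p :: ps => (cur.reverse ++ p) :: ps) := by
  induction fuel with
  | zero => intro l cur acc h; omega
  | succ fuel ih =>
    intro l cur acc h
    cases l with
    | nil => simp [PySem.Chars.splitOn.go, splitDot]
    | cons c rest =>
      by_cases hc : c = '.'
      · subst hc
        have : List.isPrefixOf ['.'] ('.' :: rest) = true := by simp [List.isPrefixOf]
        simp only [PySem.Chars.splitOn.go, this, if_pos, List.length_cons, List.drop_succ_cons]
        simp only [List.length_nil, List.drop_zero]
        rw [ih rest [] (cur.reverse :: acc) (by simpa using Nat.lt_of_succ_lt_succ h)]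
        cases hs : splitDot rest with
        | nil => exact absurd hs (splitDot_ne_nil rest)
        | cons p ps => simp [splitDot, hs]
      · have : List.isPrefixOf ['.'] (c :: rest) = false := by
          simp [List.isPrefixOf, Ne.symm hc]
        simp only [PySem.Chars.splitOn.go, this, Bool.false_eq_true, if_false]
        rw [ih rest (c :: cur) acc (by simpa using Nat.lt_of_succ_lt_succ h)]
        cases hs : splitDot rest with
        | nil => exact absurd hs (splitDot_ne_nil rest)
        | cons p ps => simp [splitDot, hc, hs]

theorem splitOn_eq_splitDot (cs : List Char) : PySem.Chars.splitOn cs ['.'] = splitDot cs := by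
  unfold PySem.Chars.splitOn
  rw [splitOn_go_eq (cs.length + 1) cs [] [] (by omega)]
  cases hs : splitDot cs with
  | nil => exact absurd hs (splitDot_ne_nil cs)
  | cons p ps => simp

-- the index of the last '.' (-1 if none), from the front
def lastd : List Char → Int
  | [] => -1
  | c :: rest => if 1 ≤ rest.count '.' then lastd rest + 1 else if c = '.' then 0 else -1

theorem lastd_nonneg (cs : List Char) (h : 1 ≤ cs.count '.') : 0 ≤ lastd cs := by
  induction cs with
  | nil => simp at h
  | cons c rest ih =>
    simp only [lastd]
    by_cases h1 : 1 ≤ rest.count '.'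
    · have := ih h1; simp [h1]; omega
    · have hc : c = '.' := by
        by_contra hne
        have hcc : (c :: rest).count '.' = rest.count '.' := by
          simp [hne]
        omega
      simp [h1, hc]

theorem lastd_neg_iff (cs : List Char) : lastd cs = -1 ↔ cs.count '.' = 0 := by
  induction cs with
  | nil => simp [lastd]
  | cons c rest ih =>
    simp only [lastd, List.count_cons]
    by_cases h : 1 ≤ rest.count '.'
    · have hn := lastd_nonneg rest h
      simp only [h, if_true]
      constructor
      · intro he; exact absurd he (by omega)
      · intro he
        exact absurd he (by split <;> omega)
    · have h0 : rest.count '.' = 0 := by omega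
      by_cases hc : c = '.' <;> simp [hc, h0]

theorem lastd_lt_length (cs : List Char) : lastd cs < cs.length := by
  induction cs with
  | nil => simp [lastd]
  | cons c rest ih =>
    simp only [lastd, List.length_cons]
    by_cases h1 : 1 ≤ rest.count '.'
    · simp [h1]; omega
    · by_cases hc : c = '.' <;> simp [h1, hc]

theorem rfind_go_cons (c : Char) (cs : List Char) : ∀ (j : Nat),
    PySem.Chars.rfind.go (c :: cs) ['.'] (j + 1)
      = if PySem.Chars.rfind.go cs ['.'] j = -1 then (if c = '.' then (0 : Int) else -1)
        else PySem.Chars.rfind.go cs ['.'] j + 1 := by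
  intro j
  induction j with
  | zero =>
    simp only [PySem.Chars.rfind.go, List.drop_succ_cons, List.drop_zero]
    by_cases hp : List.isPrefixOf ['.'] cs
    · simp [hp]
    · simp only [hp, Bool.false_eq_true, if_false]
      have hpc : List.isPrefixOf ['.'] (c :: cs) = ('.' == c) := by
        simp [List.isPrefixOf]
      by_cases hc : c = '.'
      · simp [hc]
      · simp [hpc, hc, Ne.symm hc]
  | succ k ih =>
    simp only [PySem.Chars.rfind.go, List.drop_succ_cons] at *
    by_cases hp : List.isPrefixOf ['.'] (List.drop (k + 1) cs)
    · simp only [hp, if_true]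
      split <;> omega
    · simp only [hp, Bool.false_eq_true, if_false]
      exact ih

theorem rfind_eq_lastd (cs : List Char) : PySem.Chars.rfind cs ['.'] = lastd cs := by
  induction cs with
  | nil => simp [PySem.Chars.rfind, PySem.Chars.rfind.go, lastd, List.isPrefixOf]
  | cons c rest ih =>
    have hr : PySem.Chars.rfind (c :: rest) ['.']
        = PySem.Chars.rfind.go (c :: rest) ['.'] (rest.length + 1) := rfl
    have hr2 : PySem.Chars.rfind rest ['.'] = PySem.Chars.rfind.go rest ['.'] rest.length := rfl
    rw [hr, rfind_go_cons, ← hr2, ih]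
    simp only [lastd]
    by_cases h1 : 1 ≤ rest.count '.'
    · have : ¬ lastd rest = -1 := by rw [lastd_neg_iff]; omega
      simp [h1, this]
    · have : lastd rest = -1 := by rw [lastd_neg_iff]; omega
      simp [h1, this]

theorem count_take_lastd (cs : List Char) (h : 1 ≤ cs.count '.') :
    (cs.take (lastd cs).toNat).count '.' = cs.count '.' - 1 := by
  induction cs with
  | nil => simp at h
  | cons c rest ih =>
    by_cases h1 : 1 ≤ rest.count '.'
    · have hnn := lastd_nonneg rest h1
      have : lastd (c :: rest) = lastd rest + 1 := by simp [lastd, h1]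
      rw [this]
      have ht : (lastd rest + 1).toNat = (lastd rest).toNat + 1 := by omega
      rw [ht, List.take_succ_cons]
      simp only [List.count_cons, ih h1]
      omega
    · have h0 : rest.count '.' = 0 := by omega
      have hc : c = '.' := by
        by_contra hne
        have hcc : (c :: rest).count '.' = rest.count '.' := by
          simp [hne]
        omega
      subst hc
      have hz : lastd ('.' :: rest) = 0 := by simp [lastd, h1]
      simp [hz, h0]

-- the index of the second-to-last '.' (defined where the count is ≥ 2)
def sldot : List Char → Int
  | [] => 0
  | _ :: rest => if 2 ≤ rest.count '.' then sldot rest + 1 else 0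

theorem sldot_nonneg (cs : List Char) : 0 ≤ sldot cs := by
  induction cs with
  | nil => simp [sldot]
  | cons c rest ih =>
    simp only [sldot]
    by_cases h : 2 ≤ rest.count '.' <;> simp [h]; omega

theorem lastd_take_eq_sldot (cs : List Char) (h : 2 ≤ cs.count '.') :
    lastd (cs.take (lastd cs).toNat) = sldot cs := by
  induction cs with
  | nil => simp at h
  | cons c rest ih =>
    have h1 : 1 ≤ rest.count '.' := by
      simp only [List.count_cons] at h
      split at h <;> omega
    have hnn := lastd_nonneg rest h1
    have hl : lastd (c :: rest) = lastd rest + 1 := by simp [lastd, h1]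
    rw [hl]
    have ht : (lastd rest + 1).toNat = (lastd rest).toNat + 1 := by omega
    rw [ht, List.take_succ_cons]
    have hct : (rest.take (lastd rest).toNat).count '.' = rest.count '.' - 1 :=
      count_take_lastd rest h1
    by_cases h2 : 2 ≤ rest.count '.'
    · have : 1 ≤ (rest.take (lastd rest).toNat).count '.' := by omega
      rw [show lastd (c :: rest.take (lastd rest).toNat)
            = lastd (rest.take (lastd rest).toNat) + 1 by simp [lastd, this],
          ih h2]
      simp [sldot, h2]
    · have hcr : rest.count '.' = 1 := by omega
      have hc : c = '.' := by
        simp only [List.count_cons] at h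
        by_contra hne
        simp [hne, hcr] at h
      have h0 : (rest.take (lastd rest).toNat).count '.' = 0 := by omega
      rw [show lastd (c :: rest.take (lastd rest).toNat) = 0 by
            simp [lastd, h0, hc]]
      simp [sldot, hcr]

theorem join_len (cs : List Char) (h : 2 ≤ cs.count '.') :
    ((PySem.Chars.join ['.'] ((splitDot cs).take (cs.count '.' - 1))).length : Int)
      = sldot cs := by
  induction cs with
  | nil => simp at h
  | cons c rest ih =>
    by_cases hc : c = '.'
    · subst hc
      have hcount : ('.' :: rest).count '.' = rest.count '.' + 1 := by simp
      have hsplit : splitDot ('.' :: rest) = [] :: splitDot rest := by simp [splitDot]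
      rw [hcount, hsplit, Nat.add_sub_cancel]
      by_cases h2 : 2 ≤ rest.count '.'
      · have hih := ih h2
        have hm : rest.count '.' = (rest.count '.' - 1) + 1 := by omega
        rw [show sldot ('.' :: rest) = sldot rest + 1 by simp [sldot, h2]]
        conv_lhs => rw [hm]
        rw [List.take_succ_cons]
        cases hq : (splitDot rest).take (rest.count '.' - 1) with
        | nil =>
          rcases List.take_eq_nil_iff.mp hq with h' | h' <;>
            first
            | omega
            | exact absurd h' (splitDot_ne_nil rest)
        | cons q qs =>
          rw [hq] at hih
          rw [PySem.Chars.join_cons_cons]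
          simp only [List.length_nil, List.length_append, List.length_cons] at hih ⊢
          omega
      · have hcr : rest.count '.' = 1 := by omega
        rw [hcr]
        simp [PySem.Chars.join_singleton, sldot, h2]
    · have hcount : (c :: rest).count '.' = rest.count '.' := by simp [hc]
      have h2 : 2 ≤ rest.count '.' := by omega
      cases hs : splitDot rest with
      | nil => exact absurd hs (splitDot_ne_nil rest)
      | cons p ps =>
        have hsplit : splitDot (c :: rest) = (c :: p) :: ps := by simp [splitDot, hc, hs]
        rw [hcount, hsplit]
        have hih := ih h2
        rw [hs] at hih
        have hm : rest.count '.' - 1 = (rest.count '.' - 2) + 1 := by omega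
        rw [hm, List.take_succ_cons] at hih ⊢
        rw [show sldot (c :: rest) = sldot rest + 1 by simp [sldot, h2]]
        cases hq : ps.take (rest.count '.' - 2) with
        | nil =>
          rw [hq] at hih
          rw [PySem.Chars.join_singleton] at hih ⊢
          simp only [List.length_cons]
          omega
        | cons q qs =>
          rw [hq] at hih
          rw [PySem.Chars.join_cons_cons] at hih ⊢
          simp only [List.length_append, List.length_cons] at hih ⊢
          omega

-- strict "closer to mid, ties to the right" order induced by B's min key
def pvLt (mid x y : Int) : Prop :=
  |x - mid| < |y - mid| ∨ (|x - mid| = |y - mid| ∧ mid - x < mid - y)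

theorem pvLt_irrefl (mid x : Int) : ¬ pvLt mid x x := by
  simp [pvLt]

theorem pvLt_asymm {mid x y : Int} (h : pvLt mid x y) : ¬ pvLt mid y x := by
  unfold pvLt at *
  rcases h with h | ⟨h1, h2⟩ <;> rintro (h' | ⟨h1', h2'⟩) <;> omega

theorem pvStep_cond (mid i m : Int) :
    ((decide (|i - mid| < |m - mid|)
        || (!decide (|m - mid| < |i - mid|) && decide (mid - i < mid - m))) = true)
      ↔ pvLt mid i m := by
  simp only [Bool.or_eq_true, Bool.and_eq_true, Bool.not_eq_true', decide_eq_true_eq,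
    decide_eq_false_iff_not, pvLt]
  constructor
  · rintro (h | ⟨h1, h2⟩)
    · exact Or.inl h
    · rcases lt_trichotomy (|i - mid|) (|m - mid|) with h' | h' | h'
      · exact Or.inl h'
      · exact Or.inr ⟨h', h2⟩
      · exact absurd h' h1
  · rintro (h | ⟨h1, h2⟩)
    · exact Or.inl h
    · exact Or.inr ⟨by omega, h2⟩

-- B's  min(near, key=…)  as a plain fold under an arbitrary accumulator
def pvFold (mid : Int) (acc : Option Int) (l : List Int) : Option Int :=
  List.foldl
    (fun acc z =>
      match acc with
      | none => some z
      | some m =>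
        if (decide (|z - mid| < |m - mid|)
            || (!decide (|m - mid| < |z - mid|) && decide (mid - z < mid - m))) = true
        then some z else some m)
    acc l

theorem min2?_eq_pvFold (mid : Int) (xs : List Int) :
    PySem.List.min2? xs (fun i => |i - mid|) (fun i => mid - i) = pvFold mid none xs := by
  unfold PySem.List.min2? pvFold
  congr 1
  funext acc z
  rcases acc with _ | m <;> rfl

theorem pvFold_cons (mid : Int) (acc : Option Int) (z : Int) (rest : List Int) :
    pvFold mid acc (z :: rest)
      = pvFold mid
          (match acc with
           | none => some z
           | some m =>
             if (decide (|z - mid| < |m - mid|)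
                 || (!decide (|m - mid| < |z - mid|) && decide (mid - z < mid - m))) = true
             then some z else some m)
          rest := rfl

theorem min2?_eq_of_unique (mid : Int) (xs : List Int) (x : Int) (hx : x ∈ xs)
    (hmin : ∀ y ∈ xs, y ≠ x → pvLt mid x y) :
    PySem.List.min2? xs (fun i => |i - mid|) (fun i => mid - i) = some x := by
  rw [min2?_eq_pvFold]
  suffices h : ∀ (l : List Int) (acc : Option Int),
      (∀ y ∈ l, y ≠ x → pvLt mid x y) →
      (acc = some x ∨ (acc = none ∧ x ∈ l) ∨ (∃ m, acc = some m ∧ x ∈ l ∧ pvLt mid x m)) →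
      pvFold mid acc l = some x by
    exact h xs none hmin (Or.inr (Or.inl ⟨rfl, hx⟩))
  intro l
  induction l with
  | nil =>
    intro acc _ hacc
    rcases hacc with h | ⟨_, h⟩ | ⟨m, _, h, _⟩
    · simp [pvFold, h]
    · simp at h
    · simp at h
  | cons z rest ih =>
    intro acc hl hacc
    rw [pvFold_cons]
    apply ih
    · intro y hy hne
      exact hl y (List.mem_cons_of_mem _ hy) hne
    · rcases hacc with rfl | ⟨rfl, hxl⟩ | ⟨m, rfl, hxl, hxm⟩
      · -- acc = some x
        by_cases hz : pvLt mid z x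
        · have hne : z ≠ x := by
            rintro rfl
            exact pvLt_irrefl mid z hz
          exact absurd hz (pvLt_asymm (hl z List.mem_cons_self hne))
        · left
          have hcond : (decide (|z - mid| < |x - mid|)
              || (!decide (|x - mid| < |z - mid|) && decide (mid - z < mid - x))) = false := by
            rw [Bool.eq_false_iff]
            intro hcontra
            exact hz ((pvStep_cond mid z x).mp hcontra)
          show (if ((decide (|z - mid| < |x - mid|)
              || (!decide (|x - mid| < |z - mid|) && decide (mid - z < mid - x))) = true)
            then some z else some x) = some x
          rw [hcond]
          simp
      · -- acc = none
        by_cases hz : z = x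
        · subst hz; left; rfl
        · right; right
          refine ⟨z, rfl, ?_, hl z List.mem_cons_self hz⟩
          rcases List.mem_cons.mp hxl with h' | h'
          · exact absurd h'.symm hz
          · exact h'
      · -- acc = some m, x ∈ z :: rest, pvLt mid x m
        by_cases hz : z = x
        · subst hz
          left
          have hcond : (decide (|z - mid| < |m - mid|)
              || (!decide (|m - mid| < |z - mid|) && decide (mid - z < mid - m))) = true :=
            (pvStep_cond mid z m).mpr hxm
          show (if ((decide (|z - mid| < |m - mid|)
              || (!decide (|m - mid| < |z - mid|) && decide (mid - z < mid - m))) = true)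
            then some z else some m) = some z
          rw [hcond]
          simp
        · have hxrest : x ∈ rest := by
            rcases List.mem_cons.mp hxl with h' | h'
            · exact absurd h'.symm hz
            · exact h'
          right; right
          by_cases hc : pvLt mid z m
          · refine ⟨z, ?_, hxrest, hl z List.mem_cons_self hz⟩
            have hcond := (pvStep_cond mid z m).mpr hc
            show (if ((decide (|z - mid| < |m - mid|)
                || (!decide (|m - mid| < |z - mid|) && decide (mid - z < mid - m))) = true)
              then some z else some m) = some z
            rw [hcond]
            simp
          · refine ⟨m, ?_, hxrest, hxm⟩
            have hcond : (decide (|z - mid| < |m - mid|)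
                || (!decide (|m - mid| < |z - mid|) && decide (mid - z < mid - m))) = false := by
              rw [Bool.eq_false_iff]
              intro hcontra
              exact hc ((pvStep_cond mid z m).mp hcontra)
            show (if ((decide (|z - mid| < |m - mid|)
                || (!decide (|m - mid| < |z - mid|) && decide (mid - z < mid - m))) = true)
              then some z else some m) = some m
            rw [hcond]
            simp

theorem mem_pvNear (q : String) (mid i : Int) :
    i ∈ pvNear q mid ↔ (pvHit q i = true ∧ |i - mid| < 20) := by
  constructor
  · intro h
    simp only [pvNear, List.mem_map, List.mem_filter] at h
    obtain ⟨⟨j, ch⟩, ⟨hmem, hf⟩, rfl⟩ := h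
    rw [PySem.List.mem_enumerate_iff] at hmem
    obtain ⟨k, hk, heq⟩ := hmem
    have hj : j = (k : Int) := by
      have := congrArg Prod.fst heq
      simpa using this
    have hch : ch = q.toList[k] := by
      have := congrArg Prod.snd heq
      simpa using this
    subst hj
    subst hch
    simp only [Bool.and_eq_true, decide_eq_true_eq] at hf
    refine ⟨?_, hf.2⟩
    unfold pvHit
    have hlen : ((k : Int)) < PySem.Str.len q := by
      rw [PySem.Str.len_eq]
      exact_mod_cast hk
    have hget : PySem.Str.pyGet? q (k : Int) = some (q.toList[k]) := by
      rw [PySem.Str.pyGet?_natCast]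
      exact List.getElem?_eq_getElem hk
    rw [hget]
    simp only [Bool.and_eq_true, decide_eq_true_eq]
    exact ⟨⟨Int.natCast_nonneg k, hlen⟩, hf.1⟩
  · rintro ⟨hh, hd⟩
    unfold pvHit at hh
    simp only [Bool.and_eq_true, decide_eq_true_eq] at hh
    obtain ⟨⟨h0, hlen⟩, hmatch⟩ := hh
    have hk : i.toNat < q.toList.length := by
      rw [PySem.Str.len_eq] at hlen
      omega
    have hi : ((i.toNat : Nat) : Int) = i := Int.toNat_of_nonneg h0
    have hget? : PySem.Str.pyGet? q i = q.toList[i.toNat]? := by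
      rw [← hi, PySem.Str.pyGet?_natCast]
      congr 1
    have hget : PySem.Str.pyGet? q i = some (q.toList[i.toNat]) := by
      rw [hget?]
      exact List.getElem?_eq_getElem hk
    rw [hget] at hmatch
    simp only [pvNear, List.mem_map, List.mem_filter]
    refine ⟨(i, q.toList[i.toNat]), ⟨?_, ?_⟩, rfl⟩
    · rw [PySem.List.mem_enumerate_iff]
      exact ⟨i.toNat, hk, by simp [hi]⟩
    · simp only [Bool.and_eq_true, decide_eq_true_eq]
      exact ⟨hmatch, hd⟩

theorem fallback_aux (q : String) (mid : Int) :
    ∀ (k a : Nat), a + k = 20 →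
    (∀ i ∈ pvNear q mid, (a : Int) ≤ |i - mid|) →
    pvLoopA q mid (PySem.List.pyRange (a : Int) 20)
      = (match PySem.List.min2? (pvNear q mid) (fun i => |i - mid|) (fun i => mid - i) with
         | some m => m + 1
         | none => mid) := by
  intro k
  induction k with
  | zero =>
    intro a ha hinv
    have ha20 : a = 20 := by omega
    subst ha20
    have hnil : pvNear q mid = [] := by
      rw [List.eq_nil_iff_forall_not_mem]
      intro i hi
      have hlow := hinv i hi
      have hup := ((mem_pvNear q mid i).mp hi).2
      omega
    rw [hnil, show ((20 : Nat) : Int) = 20 by norm_num,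
      show PySem.List.pyRange (20 : Int) 20 = [] from rfl]
    rfl
  | succ k ihk =>
    intro a ha hinv
    have halt : (a : Int) < 20 := by omega
    rw [PySem.List.pyRange_one_cons halt]
    have hxa : |mid + (a : Int) - mid| = (a : Int) := by
      rw [show mid + (a : Int) - mid = (a : Int) by ring]
      exact abs_of_nonneg (by positivity)
    have hya : |mid - (a : Int) - mid| = (a : Int) := by
      rw [show mid - (a : Int) - mid = -(a : Int) by ring, abs_neg]
      exact abs_of_nonneg (by positivity)
    simp only [pvLoopA]
    by_cases h1 : pvHit q (mid + (a : Int))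
    · rw [if_pos h1]
      have hmem : (mid + (a : Int)) ∈ pvNear q mid := by
        rw [mem_pvNear]
        exact ⟨h1, by omega⟩
      rw [min2?_eq_of_unique mid _ _ hmem ?_]
      · intro y hy hne
        have hay := hinv y hy
        by_cases he : |y - mid| = (a : Int)
        · have hcase : y = mid + (a : Int) ∨ y = mid - (a : Int) := by
            rcases abs_cases (y - mid) with ⟨h', _⟩ | ⟨h', _⟩ <;> omega
          rcases hcase with rfl | rfl
          · exact absurd rfl hne
          · have hapos : (0 : Int) < (a : Int) := by
              by_contra hz
              exact hne (by omega)
            right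
            refine ⟨by rw [hxa, hya], ?_⟩
            omega
        · left
          rw [hxa]
          omega
    · rw [if_neg h1]
      by_cases h2 : pvHit q (mid - (a : Int))
      · rw [if_pos h2]
        have hmem : (mid - (a : Int)) ∈ pvNear q mid := by
          rw [mem_pvNear]
          exact ⟨h2, by omega⟩
        rw [min2?_eq_of_unique mid _ _ hmem ?_]
        · intro y hy hne
          have hay := hinv y hy
          by_cases he : |y - mid| = (a : Int)
          · have hcase : y = mid + (a : Int) ∨ y = mid - (a : Int) := by
              rcases abs_cases (y - mid) with ⟨h', _⟩ | ⟨h', _⟩ <;> omega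
            rcases hcase with rfl | rfl
            · exact absurd ((mem_pvNear q mid _).mp hy).1 h1
            · exact absurd rfl hne
          · left
            rw [hya]
            omega
      · rw [if_neg h2]
        apply ihk (a + 1) (by omega)
        intro i hi
        have hai := hinv i hi
        by_cases he : |i - mid| = (a : Int)
        · have hcase : i = mid + (a : Int) ∨ i = mid - (a : Int) := by
            rcases abs_cases (i - mid) with ⟨h', _⟩ | ⟨h', _⟩ <;> omega
          rcases hcase with rfl | rfl
          · exact absurd ((mem_pvNear q mid _).mp hi).1 h1
          · exact absurd ((mem_pvNear q mid _).mp hi).1 h2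
        · push_cast
          omega

theorem fallback_eq (q : String) :
    pvLoopA q (PySem.Int.floordiv (PySem.Str.len q) 2) (PySem.List.pyRange 0 20)
      = pvFallbackB q := by
  have h := fallback_aux q (PySem.Int.floordiv (PySem.Str.len q) 2) 20 0 rfl
    (by intro i _; simp)
  rw [show ((0 : Nat) : Int) = 0 by norm_num] at h
  rw [h]
  rfl

theorem sentences_eq (query : String) :
    (PySem.Str.split? query ".").getD [] = (splitDot query.toList).map String.ofList := by
  unfold PySem.Str.split?
  rw [show ("." : String).toList = ['.'] from rfl]
  unfold PySem.Chars.split?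
  simp [splitOn_eq_splitDot]

theorem rfind_str (query : String) :
    PySem.Str.rfind query "." = lastd query.toList := by
  rw [PySem.Str.rfind_eq, show ("." : String).toList = ['.'] from rfl, rfind_eq_lastd]

theorem rfindFrom_prev (query : String) (h1 : 1 ≤ query.toList.count '.') :
    PySem.Str.rfindFrom query "." 0 (some (lastd query.toList))
      = lastd (query.toList.take (lastd query.toList).toNat) := by
  have hnn := lastd_nonneg _ h1
  have hlt := lastd_lt_length query.toList
  have hpn : -1 ≤ lastd (query.toList.take (lastd query.toList).toNat) := by
    by_cases hc : 1 ≤ (query.toList.take (lastd query.toList).toNat).count '.'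
    · have := lastd_nonneg _ hc
      omega
    · have : (query.toList.take (lastd query.toList).toNat).count '.' = 0 := by omega
      rw [(lastd_neg_iff _).mpr this]
  rw [PySem.Str.rfindFrom_eq, show ("." : String).toList = ['.'] from rfl]
  unfold PySem.Chars.rfindFrom
  simp only []
  rw [if_neg (by omega : ¬ ((query.toList.length : Int) < lastd query.toList)),
    if_neg (by omega : ¬ (lastd query.toList < 0)),
    if_neg (by omega : ¬ ((0 : Int) < 0)),
    if_neg (by omega : ¬ (lastd query.toList < (0 : Int)))]
  rw [show ((0 : Int)).toNat = 0 from rfl, List.drop_zero, rfind_eq_lastd]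
  by_cases hneg : lastd (query.toList.take (lastd query.toList).toNat) = -1
  · rw [if_pos hneg, hneg]
  · rw [if_neg hneg]
    omega

theorem A_two (query : String) (h2 : 2 ≤ query.toList.count '.') :
    find_injection_point_py query = sldot query.toList + 1 := by
  unfold find_injection_point_py
  simp only [sentences_eq query]
  have hlen3 : 3 ≤ ((splitDot query.toList).map String.ofList).length := by
    rw [List.length_map, length_splitDot]
    omega
  rw [if_pos hlen3]
  rw [PySem.List.slice_to_neg_ofNat _ 2 (by norm_num)]
  rw [List.length_map, length_splitDot,
    show query.toList.count '.' + 1 - 2 = query.toList.count '.' - 1 from by omega,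
    ← List.map_take]
  unfold PySem.Str.join
  rw [show ("." : String).toList = ['.'] from rfl]
  simp only [List.map_map, Function.comp_def, String.toList_ofList, List.map_id']
  rw [PySem.Str.len_append, PySem.Str.len_eq, String.toList_ofList,
    show PySem.Str.len "." = 1 from rfl, join_len query.toList h2]

theorem B_two (query : String) (h2 : 2 ≤ query.toList.count '.') :
    find_injection_point_py_alt query = sldot query.toList + 1 := by
  unfold find_injection_point_py_alt
  have h1 : 1 ≤ query.toList.count '.' := by omega
  have hnn := lastd_nonneg _ h1
  have hne : lastd query.toList ≠ -1 := by omega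
  have hprev : PySem.Str.rfindFrom query "." 0 (some (lastd query.toList))
      = sldot query.toList := by
    rw [rfindFrom_prev query h1, lastd_take_eq_sldot _ h2]
  have hsn := sldot_nonneg query.toList
  have hpne : ¬ sldot query.toList = -1 := by omega
  simp only [rfind_str query, hne, ne_eq, not_false_iff, if_true, hprev, hpne]

theorem A_low (query : String) (hlt : query.toList.count '.' < 2) :
    find_injection_point_py query
      = pvLoopA query (PySem.Int.floordiv (PySem.Str.len query) 2) (PySem.List.pyRange 0 20) := by
  unfold find_injection_point_py
  simp only [sentences_eq query]
  have hlen3 : ¬ 3 ≤ ((splitDot query.toList).map String.ofList).length := by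
    rw [List.length_map, length_splitDot]
    omega
  rw [if_neg hlen3]

theorem B_low (query : String) (hlt : query.toList.count '.' < 2) :
    find_injection_point_py_alt query = pvFallbackB query := by
  unfold find_injection_point_py_alt
  rcases (by omega : query.toList.count '.' = 0 ∨ query.toList.count '.' = 1) with h0 | h1
  · have hl : lastd query.toList = -1 := (lastd_neg_iff _).mpr h0
    simp [rfind_eq_lastd, hl]
  · have h1' : 1 ≤ query.toList.count '.' := by omega
    have hnn := lastd_nonneg _ h1'
    have hne : lastd query.toList ≠ -1 := by omega
    have hprev := rfindFrom_prev query h1'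
    have hc0 : (query.toList.take (lastd query.toList).toNat).count '.' = 0 := by
      have := count_take_lastd _ h1'
      omega
    have hpneg : lastd (query.toList.take (lastd query.toList).toNat) = -1 :=
      (lastd_neg_iff _).mpr hc0
    have hprevC : PySem.Chars.rfindFrom query.toList ['.'] 0 (some (lastd query.toList)) = -1 := by
      have hthis := rfindFrom_prev query h1'
      rw [PySem.Str.rfindFrom_eq, show ("." : String).toList = ['.'] from rfl] at hthis
      rw [hthis, hpneg]
    simp [rfind_eq_lastd, hne, hprevC]

-- ===== VERDICT (by name: the statement is the Claim_ definition above) =====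
theorem find_injection_point_py_spec : Claim_equal_find_injection_point_py := by
  intro query _
  unfold Spec_find_injection_point_py
  by_cases h2 : 2 ≤ query.toList.count '.'
  · rw [A_two query h2, B_two query h2]
  · rw [A_low query (by omega), B_low query (by omega), fallback_eq]
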